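-- pv_equiv track=rewrite | github.com/haramsk1/AeroCalc-Model-3 | App.py | format_choices_for_ui
-- ===== SOURCE A (Python) =====
-- def format_choices_for_ui(params_dict, include_calculable_only=False, is_multiselect=False):
--     choices = []
--     categories = {}
--
--     # Create a dictionary to group parameters by category
--     for key, data in params_dict.items():
--         if include_calculable_only and not data.get('is_calculable', False):
--             continue
--
--         category = data.get('category', 'Uncategorized')
--         if category not in categories:
--             categories[category] = []
--         categories[category].append(data['display_name'])
--
--     # Format the final list of choices
--     for category, params in sorted(categories.items()):
--         # For the multiselect 'knowns' list, add category headers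
--         if is_multiselect:
--             choices.append(f"--- {category} ---")
--
--         for param in sorted(params):
--             choices.append(param)
--
--     return choices
-- ===== SOURCE B (Python) =====
-- def format_choices_for_ui(params_dict, include_calculable_only=False, is_multiselect=False):
--     # One flat list of (category, display_name), sorted once; headers at category boundaries.
--     pairs = []
--     for data in params_dict.values():
--         if include_calculable_only and not data.get('is_calculable', False):
--             continue
--         pairs.append((data.get('category', 'Uncategorized'), data['display_name']))
--     pairs.sort()
--     choices = []
--     prev = None
--     for category, name in pairs:
--         if is_multiselect and category != prev:
--             choices.append(f"--- {category} ---")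
--             prev = category
--         choices.append(name)
--     return choices
-- ===== Notes on version B (the rewrite author's own statement) =====
-- stated objective: alternative
-- what changed: Replaces group-into-dict-then-sort-each-group with building one flat (category, display_name) list, a single lexicographic sort, and a linear scan that emits a category header whenever the category changes.
import Mathlib
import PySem

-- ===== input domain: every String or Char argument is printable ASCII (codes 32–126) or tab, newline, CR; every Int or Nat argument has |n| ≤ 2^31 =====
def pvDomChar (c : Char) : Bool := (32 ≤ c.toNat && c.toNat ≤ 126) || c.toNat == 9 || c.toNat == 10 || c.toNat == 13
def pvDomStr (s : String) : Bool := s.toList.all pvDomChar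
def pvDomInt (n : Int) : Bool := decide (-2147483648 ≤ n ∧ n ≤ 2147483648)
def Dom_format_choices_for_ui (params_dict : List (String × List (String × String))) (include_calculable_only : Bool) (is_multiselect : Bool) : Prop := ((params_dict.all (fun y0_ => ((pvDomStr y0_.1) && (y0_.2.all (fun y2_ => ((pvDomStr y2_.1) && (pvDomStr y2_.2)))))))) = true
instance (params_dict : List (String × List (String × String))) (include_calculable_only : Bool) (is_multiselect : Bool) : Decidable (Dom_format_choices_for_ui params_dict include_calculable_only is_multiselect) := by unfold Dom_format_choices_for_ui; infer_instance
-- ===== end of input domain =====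

-- B replaces group-into-dict-then-sort-each-group by one flat lexicographic sort plus a
-- boundary-detecting scan (objective: alternative decomposition, same asymptotic cost).

-- shared transliterations of the Python dict primitives on the inner dicts
-- data.get(k) : first-match association lookup
def pvGet (data : List (String × String)) (k : String) : Option String :=
  (data.find? (fun p => p.1 == k)).map (fun p => p.2)

-- 'include_calculable_only and not data.get("is_calculable", False)' (missing/empty string is falsy)
def pvSkip (co : Bool) (data : List (String × String)) : Bool :=
  co && (match pvGet data "is_calculable" with | none => true | some s => s == "")

-- data.get('category', 'Uncategorized')
def pvCatOf (data : List (String × String)) : String := (pvGet data "category").getD "Uncategorized"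
-- data['display_name']; total form with default "" — Pre_ excludes the KeyError inputs
def pvNameOf (data : List (String × String)) : String := (pvGet data "display_name").getD ""
-- f"--- {category} ---"
def pvHdr (c : String) : String := "--- " ++ c ++ " ---"

-- ===== PORT A =====
-- keys of a Python dict are distinct, so sorting categories.items() by the key alone is
-- exactly Python's tuple sort of the items (the list component is never compared).
def format_choices_for_ui (params_dict : List (String × List (String × String))) (include_calculable_only : Bool) (is_multiselect : Bool) : List String :=
  let categories : PySem.Dict String (List String) :=
    params_dict.foldl (fun cats kd =>
      if pvSkip include_calculable_only kd.2 then cats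
      else
        let category := pvCatOf kd.2
        let cats := if cats.contains category then cats else cats.insert category ([] : List String)
        cats.modify category [] (fun l => l ++ [pvNameOf kd.2])) PySem.Dict.empty
  (PySem.List.sorted categories.items (fun p => p.1)).foldl
    (fun choices cp =>
      let choices := if is_multiselect then choices ++ [pvHdr cp.1] else choices
      (PySem.List.sorted cp.2 (fun s => s)).foldl (fun ch param => ch ++ [param]) choices) []

-- ===== PORT B =====
-- the loop body of Source B's final scan: maybe emit a header and update prev, then append the name
def pvStep (ms : Bool) (st : List String × Option String) (cn : String × String) : List String × Option String :=
  let st := if ms && !(st.2 == some cn.1) then (st.1 ++ [pvHdr cn.1], some cn.1) else st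
  (st.1 ++ [cn.2], st.2)

def format_choices_for_ui_alt (params_dict : List (String × List (String × String))) (include_calculable_only : Bool) (is_multiselect : Bool) : List String :=
  let pairs := params_dict.foldl (fun ps kd =>
    if pvSkip include_calculable_only kd.2 then ps
    else ps ++ [(pvCatOf kd.2, pvNameOf kd.2)]) []
  let pairs := PySem.List.sorted2 pairs (fun p => p.1) (fun p => p.2)
  (pairs.foldl (pvStep is_multiselect) (([] : List String), (none : Option String))).1

-- ===== PRECONDITION & SPEC =====
-- Pre_ excludes exactly the inputs where Python A raises KeyError: an entry that passes the
-- is_calculable filter but has no 'display_name' key.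
def Pre_format_choices_for_ui (params_dict : List (String × List (String × String))) (include_calculable_only : Bool) (is_multiselect : Bool) : Prop :=
  ∀ kd ∈ params_dict, pvSkip include_calculable_only kd.2 = false → (pvGet kd.2 "display_name").isSome = true
instance (params_dict : List (String × List (String × String))) (include_calculable_only : Bool) (is_multiselect : Bool) : Decidable (Pre_format_choices_for_ui params_dict include_calculable_only is_multiselect) := by unfold Pre_format_choices_for_ui; infer_instance
def pvWitness_format_choices_for_ui : (List (String × List (String × String))) × Bool × Bool :=
  ([("speed", [("display_name", "Speed"), ("category", "Motion")]),
    ("mass", [("display_name", "Mass")])], false, true)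

def Spec_format_choices_for_ui (params_dict : List (String × List (String × String))) (include_calculable_only : Bool) (is_multiselect : Bool) (out : List String) : Prop := out = format_choices_for_ui_alt params_dict include_calculable_only is_multiselect
instance (params_dict : List (String × List (String × String))) (include_calculable_only : Bool) (is_multiselect : Bool) (out : List String) : Decidable (Spec_format_choices_for_ui params_dict include_calculable_only is_multiselect out) := by unfold Spec_format_choices_for_ui; infer_instance

-- ===== CLAIM (what is proved, stated in full; the proofs are below) =====
def Claim_equal_format_choices_for_ui : Prop := ∀ (params_dict : List (String × List (String × String))) (include_calculable_only : Bool) (is_multiselect : Bool), Dom_format_choices_for_ui params_dict include_calculable_only is_multiselect → Pre_format_choices_for_ui params_dict include_calculable_only is_multiselect → Spec_format_choices_for_ui params_dict include_calculable_only is_multiselect (format_choices_for_ui params_dict include_calculable_only is_multiselect)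

-- ===== LEMMAS AND PROOFS =====

-- the filtered flat list of (category, display_name) pairs both programs are really about
def pvL (params_dict : List (String × List (String × String))) (co : Bool) : List (String × String) :=
  params_dict.filterMap (fun kd => if pvSkip co kd.2 then none else some (pvCatOf kd.2, pvNameOf kd.2))

def pvRaw (L : List (String × String)) (c : String) : List String :=
  (L.filter (fun p => p.1 == c)).map (fun p => p.2)

def pvC (L : List (String × String)) : List String :=
  PySem.List.sorted (PySem.Set.ofList (L.map (fun p => p.1))) (fun x => x)

def pvNs (L : List (String × String)) (c : String) : List String :=
  PySem.List.sorted (pvRaw L c) (fun s => s)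

def pvOut (ms : Bool) (L : List (String × String)) : List String :=
  (pvC L).flatMap (fun c => (if ms then [pvHdr c] else []) ++ pvNs L c)

-- the skip-else folds of both ports are folds over pvL
theorem pv_pairs_eq (params_dict : List (String × List (String × String))) (co : Bool)
    (acc : List (String × String)) :
    params_dict.foldl (fun ps kd =>
        if pvSkip co kd.2 then ps else ps ++ [(pvCatOf kd.2, pvNameOf kd.2)]) acc
      = acc ++ pvL params_dict co := by
  induction params_dict generalizing acc with
  | nil => simp [pvL]
  | cons kd t ih =>
    by_cases h : pvSkip co kd.2 = true <;> simp [pvL, h, ih]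

theorem pv_dict_step_eq_modify (d : PySem.Dict String (List String)) (c n : String) :
    (if d.contains c then d else d.insert c ([] : List String)).modify c []
        (fun l => l ++ [n])
      = d.modify c [] (fun l => l ++ [n]) := by
  by_cases h : d.contains c = true
  · simp [h]
  · simp only [Bool.not_eq_true] at h
    simp [h, PySem.Dict.modify, PySem.Dict.getD_insert_self, PySem.Dict.insert_insert_self,
      PySem.Dict.getD_of_not_contains d ([] : List String) h]

theorem pv_cats_eq (params_dict : List (String × List (String × String))) (co : Bool)
    (d : PySem.Dict String (List String)) :
    params_dict.foldl (fun cats kd =>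
        if pvSkip co kd.2 then cats
        else (if cats.contains (pvCatOf kd.2) then cats
              else cats.insert (pvCatOf kd.2) ([] : List String)).modify (pvCatOf kd.2) []
            (fun l => l ++ [pvNameOf kd.2])) d
      = (pvL params_dict co).foldl (fun d p => d.modify p.1 [] (fun l => l ++ [p.2])) d := by
  induction params_dict generalizing d with
  | nil => simp [pvL]
  | cons kd t ih =>
    simp only [List.foldl_cons, pvL, List.filterMap_cons]
    by_cases h : pvSkip co kd.2 = true
    · simp only [h, ite_true]
      exact ih d
    · simp only [h, ite_false, Bool.false_eq_true]
      rw [pv_dict_step_eq_modify]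
      simp only [List.foldl_cons]
      exact ih _

-- inner appending fold
theorem pv_foldl_app (l acc : List String) :
    l.foldl (fun ch param => ch ++ [param]) acc = acc ++ l := by
  induction l generalizing acc with
  | nil => simp
  | cons a t ih => simp [ih]

theorem pv_flatMap_congr {α β : Type} (l : List α) (f g : α → List β)
    (h : ∀ a ∈ l, f a = g a) : l.flatMap f = l.flatMap g := by
  induction l with
  | nil => rfl
  | cons a t ih => simp [h a (by simp), ih (fun a ha => h a (by simp [ha]))]

-- insertBy distributes over an append whose left part is never 'before'
theorem pv_insertBy_append_left {α : Type} (before : α → α → Bool) (x : α) (ys zs : List α)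
    (h : ∀ y ∈ ys, before x y = false) :
    PySem.List.insertBy before x (ys ++ zs) = ys ++ PySem.List.insertBy before x zs := by
  induction ys with
  | nil => rfl
  | cons a t ih =>
    have ha : before x a = false := h a (by simp)
    simp [PySem.List.insertBy, ha, ih (fun y hy => h y (by simp [hy]))]

-- insertBy never passes a suffix that is all 'before'
theorem pv_insertBy_append_all_before {α : Type} (before : α → α → Bool) (x : α) (ys zs : List α)
    (h : ∀ z ∈ zs, before x z = true) :
    PySem.List.insertBy before x (ys ++ zs) = PySem.List.insertBy before x ys ++ zs := by
  induction ys with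
  | nil =>
    cases zs with
    | nil => rfl
    | cons a t => simp [PySem.List.insertBy, h a (by simp)]
  | cons a t ih =>
    by_cases ha : before x a = true
    · simp [PySem.List.insertBy, ha]
    · simp only [Bool.not_eq_true] at ha
      simp [PySem.List.insertBy, ha, ih]

theorem pv_insertBy_all_before {α : Type} (before : α → α → Bool) (x : α) (zs : List α)
    (h : ∀ z ∈ zs, before x z = true) :
    PySem.List.insertBy before x zs = x :: zs := by
  have := pv_insertBy_append_all_before before x [] zs h
  simpa [PySem.List.insertBy] using this

theorem pv_insertBy_map {α β : Type} (f : α → β) (b' : α → α → Bool) (b : β → β → Bool)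
    (h : ∀ a a', b (f a) (f a') = b' a a') (x : α) (l : List α) :
    PySem.List.insertBy b (f x) (l.map f) = (PySem.List.insertBy b' x l).map f := by
  induction l with
  | nil => rfl
  | cons a t ih =>
    by_cases ha : b' x a = true
    · simp [PySem.List.insertBy, h, ha]
    · simp only [Bool.not_eq_true] at ha
      simp [PySem.List.insertBy, h, ha, ih]

-- a strictly sorted list splits at a missing pivot into its <c and >c filters
theorem pv_sorted_filter_split (l : List String) (c : String)
    (hpw : l.Pairwise (· < ·)) (hc : c ∉ l) :
    l = l.filter (fun y => decide (y < c)) ++ l.filter (fun y => decide (c < y)) := by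
  induction l with
  | nil => rfl
  | cons a t ih =>
    have hat : ∀ y ∈ t, a < y := (List.pairwise_cons.mp hpw).1
    have hpt := (List.pairwise_cons.mp hpw).2
    have hac : a ≠ c := fun h => hc (by simp [h])
    rcases lt_or_gt_of_ne hac with h1 | h1
    · have e1 : (fun y => decide (y < c)) a = true := decide_eq_true h1
      have e2 : ¬ ((fun y => decide (c < y)) a = true) := by
        simp only [decide_eq_true_eq]; exact lt_asymm h1
      rw [List.filter_cons, List.filter_cons, if_pos e1, if_neg e2, List.cons_append]
      exact congrArg (a :: ·) (ih hpt (fun h => hc (List.mem_cons_of_mem a h)))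
    · have h2 : t.filter (fun y => decide (y < c)) = [] := by
        apply List.filter_eq_nil_iff.mpr
        intro y hy
        simp only [decide_eq_true_eq]
        exact lt_asymm (lt_trans h1 (hat y hy))
      have h3 : t.filter (fun y => decide (c < y)) = t := by
        apply List.filter_eq_self.mpr
        intro y hy
        exact decide_eq_true (lt_trans h1 (hat y hy))
      have e1 : ¬ ((fun y => decide (y < c)) a = true) := by
        simp only [decide_eq_true_eq]; exact lt_asymm h1
      have e2 : (fun y => decide (c < y)) a = true := decide_eq_true h1
      rw [List.filter_cons, List.filter_cons, if_neg e1, if_pos e2, h2, h3, List.nil_append]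

-- Python's lexicographic tuple-lt as sorted2 computes it
def pvLt (x y : String × String) : Bool :=
  decide (x.1 < y.1) || (!decide (y.1 < x.1) && decide (x.2 < y.2))

theorem pv_sorted2_eq_foldl (L : List (String × String)) :
    PySem.List.sorted2 L (fun p => p.1) (fun p => p.2)
      = L.foldl (fun acc x => PySem.List.insertBy pvLt x acc) [] := by
  rfl

theorem pv_sorted_eq_foldl (l : List String) :
    PySem.List.sorted l (fun s => s)
      = l.foldl (fun acc x => PySem.List.insertBy (fun a b => decide (a < b)) x acc) [] := by
  rfl

theorem pv_mem_flatMap_blk (L : List (String × String)) (C : List String) (p : String × String)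
    (hp : p ∈ C.flatMap (fun c => (pvNs L c).map (fun n => (c, n)))) : p.1 ∈ C := by
  simp only [List.mem_flatMap, List.mem_map] at hp
  obtain ⟨c, hc, n, _, rfl⟩ := hp
  exact hc

theorem pv_ofList_append_mem (l : List String) (a : String) (h : a ∈ PySem.Set.ofList l) :
    PySem.Set.ofList (l ++ [a]) = PySem.Set.ofList l := by
  simp [PySem.Set.ofList, List.foldl_append, PySem.Set.add]
  exact h

theorem pv_ofList_append_not_mem (l : List String) (a : String) (h : ¬ a ∈ PySem.Set.ofList l) :
    PySem.Set.ofList (l ++ [a]) = PySem.Set.ofList l ++ [a] := by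
  simp [PySem.Set.ofList, List.foldl_append, PySem.Set.add]
  exact h

theorem pvLt_of_fst_lt {x y : String × String} (h : x.1 < y.1) : pvLt x y = true := by
  simp [pvLt, h]

theorem pvLt_false_of_fst_gt {x y : String × String} (h : y.1 < x.1) : pvLt x y = false := by
  simp [pvLt, h, lt_asymm h]

theorem pv_raw_append_ne (L : List (String × String)) (c n c' : String) (h : c ≠ c') :
    pvRaw (L ++ [(c, n)]) c' = pvRaw L c' := by
  simp [pvRaw, List.filter_append, h]

theorem pv_raw_append_self (L : List (String × String)) (c n : String) :
    pvRaw (L ++ [(c, n)]) c = pvRaw L c ++ [n] := by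
  simp [pvRaw, List.filter_append]

theorem pv_ns_append_ne (L : List (String × String)) (c n c' : String) (h : c ≠ c') :
    pvNs (L ++ [(c, n)]) c' = pvNs L c' := by
  unfold pvNs
  rw [pv_raw_append_ne L c n c' h]

theorem pv_ns_append_self (L : List (String × String)) (c n : String) :
    pvNs (L ++ [(c, n)]) c
      = PySem.List.insertBy (fun a b => decide (a < b)) n (pvNs L c) := by
  unfold pvNs
  rw [pv_raw_append_self, pv_sorted_eq_foldl, List.foldl_append, ← pv_sorted_eq_foldl]
  simp only [List.foldl_cons, List.foldl_nil]

theorem pv_mem_pvC (L : List (String × String)) (c : String) :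
    c ∈ pvC L ↔ c ∈ L.map (fun p => p.1) := by
  unfold pvC
  rw [PySem.List.mem_sorted, PySem.Set.mem_ofList]

theorem pv_ns_ne_nil (L : List (String × String)) (c : String)
    (h : c ∈ L.map (fun p => p.1)) : pvNs L c ≠ [] := by
  obtain ⟨p, hp, rfl⟩ := List.mem_map.mp h
  unfold pvNs
  rw [ne_eq, PySem.List.sorted_eq_nil_iff]
  unfold pvRaw
  intro hnil
  rw [List.map_eq_nil_iff] at hnil
  have hmem : p ∈ L.filter (fun q => q.1 == p.1) := List.mem_filter.mpr ⟨hp, by simp⟩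
  rw [hnil] at hmem
  exact absurd hmem (List.not_mem_nil)

-- THE GROUPING LEMMA: one lexicographic sort = sorted categories, each with its sorted names
theorem pv_sorted2_eq_groups (L : List (String × String)) :
    PySem.List.sorted2 L (fun p => p.1) (fun p => p.2)
      = (pvC L).flatMap (fun c => (pvNs L c).map (fun n => (c, n))) := by
  induction L using List.reverseRecOn with
  | nil => rfl
  | append_singleton L x ih =>
    obtain ⟨xc, xn⟩ := x
    rw [pv_sorted2_eq_foldl, List.foldl_append]
    simp only [List.foldl_cons, List.foldl_nil]
    rw [← pv_sorted2_eq_foldl, ih]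
    have hpwC : (pvC L).Pairwise (· < ·) := by
      unfold pvC; exact PySem.List.sorted_ofList_pairwise_lt _
    by_cases hmem : xc ∈ L.map (fun p => p.1)
    · -- the category already exists: the new pair is inserted inside its block
      have hxc : xc ∈ pvC L := (pv_mem_pvC L xc).mpr hmem
      obtain ⟨s, t, hst⟩ := List.append_of_mem hxc
      have hpw' : (s ++ xc :: t).Pairwise (· < ·) := hst ▸ hpwC
      have hs : ∀ y ∈ s, y < xc := fun y hy =>
        (List.pairwise_append.mp hpw').2.2 y hy xc (by simp)
      have ht : ∀ y ∈ t, xc < y := fun y hy =>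
        (List.pairwise_cons.mp (List.pairwise_append.mp hpw').2.1).1 y hy
      have hCnew : pvC (L ++ [(xc, xn)]) = pvC L := by
        unfold pvC
        rw [List.map_append]
        simp only [List.map_cons, List.map_nil]
        rw [pv_ofList_append_mem _ _ ((PySem.Set.mem_ofList _ _).mpr hmem)]
      rw [hCnew, hst]
      rw [List.flatMap_append, List.flatMap_append, List.flatMap_cons, List.flatMap_cons]
      have hbs : s.flatMap (fun c => (pvNs (L ++ [(xc, xn)]) c).map (fun n => (c, n)))
          = s.flatMap (fun c => (pvNs L c).map (fun n => (c, n))) :=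
        pv_flatMap_congr _ _ _ (fun c hc => by
          rw [pv_ns_append_ne L xc xn c (hs c hc).ne'])
      have hbt : t.flatMap (fun c => (pvNs (L ++ [(xc, xn)]) c).map (fun n => (c, n)))
          = t.flatMap (fun c => (pvNs L c).map (fun n => (c, n))) :=
        pv_flatMap_congr _ _ _ (fun c hc => by
          rw [pv_ns_append_ne L xc xn c (ht c hc).ne])
      rw [hbs, hbt]
      rw [pv_insertBy_append_left pvLt (xc, xn) _ _
        (fun y hy => pvLt_false_of_fst_gt (hs y.1 (pv_mem_flatMap_blk L s y hy)))]
      rw [pv_insertBy_append_all_before pvLt (xc, xn) _ _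
        (fun z hz => pvLt_of_fst_lt (ht z.1 (pv_mem_flatMap_blk L t z hz)))]
      have hmap : PySem.List.insertBy pvLt (xc, xn) ((pvNs L xc).map (fun n => (xc, n)))
          = (pvNs (L ++ [(xc, xn)]) xc).map (fun n => (xc, n)) := by
        rw [pv_insertBy_map (fun n => (xc, n)) (fun a b => decide (a < b)) pvLt
          (fun a a' => by simp [pvLt]) xn (pvNs L xc)]
        rw [pv_ns_append_self L xc xn]
      rw [hmap]
    · -- a new category: the new pair becomes its own singleton block
      have hxc : xc ∉ pvC L := fun h => hmem ((pv_mem_pvC L xc).mp h)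
      have hraw : pvRaw L xc = [] := by
        unfold pvRaw
        rw [List.map_eq_nil_iff]
        apply List.filter_eq_nil_iff.mpr
        intro p hp
        simp only [beq_iff_eq]
        exact fun heq => hmem (heq ▸ List.mem_map_of_mem hp)
      have hns_new : pvNs (L ++ [(xc, xn)]) xc = [xn] := by
        unfold pvNs
        rw [pv_raw_append_self L xc xn, hraw]
        rfl
      have hsplit : pvC L
          = (pvC L).filter (fun y => decide (y < xc))
            ++ (pvC L).filter (fun y => decide (xc < y)) :=
        pv_sorted_filter_split _ _ hpwC hxc
      have hmF1 : ∀ y ∈ (pvC L).filter (fun y => decide (y < xc)), y < xc := fun y hy =>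
        of_decide_eq_true (List.mem_filter.mp hy).2
      have hmF2 : ∀ y ∈ (pvC L).filter (fun y => decide (xc < y)), xc < y := fun y hy =>
        of_decide_eq_true (List.mem_filter.mp hy).2
      have hCnew : pvC (L ++ [(xc, xn)])
          = (pvC L).filter (fun y => decide (y < xc))
            ++ xc :: (pvC L).filter (fun y => decide (xc < y)) := by
        unfold pvC
        rw [List.map_append]
        simp only [List.map_cons, List.map_nil]
        rw [pv_ofList_append_not_mem _ _ (fun h => hmem ((PySem.Set.mem_ofList _ _).mp h))]
        apply PySem.List.sorted_eq_of_perm_of_pairwise_lt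
        · refine List.perm_middle.trans ?_
          refine (List.Perm.cons xc ?_).trans (List.perm_append_singleton xc _).symm
          have hp : ((pvC L).filter (fun y => decide (y < xc))
              ++ (pvC L).filter (fun y => decide (xc < y))).Perm
              (PySem.Set.ofList (L.map (fun p => p.1))) := by
            rw [← hsplit]
            exact PySem.List.sorted_perm _ _ _
          exact hp
        · refine List.pairwise_append.mpr ⟨?_, ?_, ?_⟩
          · exact List.Pairwise.sublist List.filter_sublist hpwC
          · exact List.pairwise_cons.mpr ⟨hmF2, List.Pairwise.sublist List.filter_sublist hpwC⟩
          · intro a ha b hb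
            rcases List.mem_cons.mp hb with rfl | hb2
            · exact hmF1 a ha
            · exact lt_trans (hmF1 a ha) (hmF2 b hb2)
      rw [hCnew]
      conv_lhs => rw [hsplit]
      rw [List.flatMap_append, List.flatMap_append, List.flatMap_cons]
      have hbs : ((pvC L).filter (fun y => decide (y < xc))).flatMap
            (fun c => (pvNs (L ++ [(xc, xn)]) c).map (fun n => (c, n)))
          = ((pvC L).filter (fun y => decide (y < xc))).flatMap
            (fun c => (pvNs L c).map (fun n => (c, n))) :=
        pv_flatMap_congr _ _ _ (fun c hc => by
          rw [pv_ns_append_ne L xc xn c (hmF1 c hc).ne'])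
      have hbt : ((pvC L).filter (fun y => decide (xc < y))).flatMap
            (fun c => (pvNs (L ++ [(xc, xn)]) c).map (fun n => (c, n)))
          = ((pvC L).filter (fun y => decide (xc < y))).flatMap
            (fun c => (pvNs L c).map (fun n => (c, n))) :=
        pv_flatMap_congr _ _ _ (fun c hc => by
          rw [pv_ns_append_ne L xc xn c (hmF2 c hc).ne])
      rw [hbs, hbt, hns_new]
      rw [pv_insertBy_append_left pvLt (xc, xn) _ _
        (fun y hy => pvLt_false_of_fst_gt (hmF1 y.1 (pv_mem_flatMap_blk L _ y hy)))]
      rw [pv_insertBy_all_before pvLt (xc, xn) _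
        (fun z hz => pvLt_of_fst_lt (hmF2 z.1 (pv_mem_flatMap_blk L _ z hz)))]
      simp

-- scanning one block whose category is already 'prev' just appends the names
theorem pv_scan_same_cat (t : List String) (c : String) (ch : List String) :
    List.foldl (pvStep true) (ch, some c) (t.map (fun n => (c, n))) = (ch ++ t, some c) := by
  induction t generalizing ch with
  | nil => simp
  | cons n t ih => simp [pvStep, ih]

theorem pv_scan_no_ms (pairs : List (String × String)) (ch : List String) (prev : Option String) :
    List.foldl (pvStep false) (ch, prev) pairs = (ch ++ pairs.map (fun p => p.2), prev) := by
  induction pairs generalizing ch with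
  | nil => simp
  | cons p t ih => simp [pvStep, ih]

-- the boundary-detecting scan over grouped blocks emits exactly A's header/name sequence
theorem pv_scan_flat (ms : Bool) (C : List String) (ns : String → List String)
    (ch : List String) (prev : Option String)
    (hpw : C.Pairwise (· < ·)) (hne : ∀ c ∈ C, ns c ≠ []) (hprev : ∀ c ∈ C, prev ≠ some c) :
    (List.foldl (pvStep ms) (ch, prev) (C.flatMap (fun c => (ns c).map (fun n => (c, n))))).1
      = ch ++ C.flatMap (fun c => (if ms then [pvHdr c] else []) ++ ns c) := by
  cases ms with
  | false =>
    rw [pv_scan_no_ms]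
    simp [List.map_flatMap]
  | true =>
    induction C generalizing ch prev with
    | nil => simp
    | cons c C' ih =>
      have hcc : ∀ c' ∈ C', c < c' := (List.pairwise_cons.mp hpw).1
      obtain ⟨n, t, hnt⟩ := List.exists_cons_of_ne_nil (hne c (by simp))
      have hstep1 : pvStep true (ch, prev) (c, n) = (ch ++ [pvHdr c] ++ [n], some c) := by
        have : (prev == some c) = false := by
          simp [beq_eq_false_iff_ne]
          exact hprev c (by simp)
        simp [pvStep, this]
      rw [List.flatMap_cons, List.foldl_append, hnt]
      simp only [List.map_cons, List.foldl_cons, hstep1]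
      rw [pv_scan_same_cat]
      rw [ih (ch ++ [pvHdr c] ++ [n] ++ t) (some c) (List.pairwise_cons.mp hpw).2
        (fun c' h => hne c' (List.mem_cons_of_mem c h))
        (fun c' h => by simp [(hcc c' h).ne])]
      simp [hnt]

-- ===== link A to pvOut =====
theorem pv_phase2_fold (ms : Bool) (L : List (String × String)) (cl : List String)
    (ch : List String) :
    (cl.map (fun c => (c, pvRaw L c))).foldl
        (fun choices cp =>
          (PySem.List.sorted cp.2 (fun s => s)).foldl (fun ch param => ch ++ [param])
            (if ms then choices ++ [pvHdr cp.1] else choices)) ch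
      = ch ++ cl.flatMap (fun c => (if ms then [pvHdr c] else []) ++ pvNs L c) := by
  induction cl generalizing ch with
  | nil => simp
  | cons c t ih =>
    simp only [List.map_cons, List.foldl_cons, List.flatMap_cons]
    rw [pv_foldl_app, ih]
    cases ms <;> simp [pvNs]

theorem pv_A_eq_pvOut (params_dict : List (String × List (String × String)))
    (co ms : Bool) :
    format_choices_for_ui params_dict co ms = pvOut ms (pvL params_dict co) := by
  have h0 : format_choices_for_ui params_dict co ms =
      (PySem.List.sorted
        ((params_dict.foldl (fun cats kd =>
            if pvSkip co kd.2 then cats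
            else (if cats.contains (pvCatOf kd.2) then cats
                  else cats.insert (pvCatOf kd.2) ([] : List String)).modify (pvCatOf kd.2) []
                (fun l => l ++ [pvNameOf kd.2])) PySem.Dict.empty).items)
        (fun p => p.1)).foldl
        (fun choices cp =>
          (PySem.List.sorted cp.2 (fun s => s)).foldl (fun ch param => ch ++ [param])
            (if ms then choices ++ [pvHdr cp.1] else choices)) [] := rfl
  rw [h0, pv_cats_eq]
  -- characterize the grouping dict built over pvL
  have hkeys : ((pvL params_dict co).foldl
        (fun d p => d.modify p.1 [] (fun l => l ++ [p.2])) PySem.Dict.empty).keys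
      = PySem.Set.ofList ((pvL params_dict co).map (fun p => p.1)) := by
    have h := PySem.Dict.keys_foldl_modify_key (pvL params_dict co) (fun p => p.1)
      ([] : List String) (fun _ p => fun l => l ++ [p.2]) PySem.Dict.empty
    rw [PySem.Dict.keys_empty] at h
    simpa [PySem.Set.update, PySem.Set.ofList, PySem.Set.empty] using h
  have hnd : ((pvL params_dict co).foldl
        (fun d p => d.modify p.1 [] (fun l => l ++ [p.2])) PySem.Dict.empty).keys.Nodup := by
    rw [hkeys]; exact PySem.Set.nodup_ofList _
  have hget : ∀ c, ((pvL params_dict co).foldl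
        (fun d p => d.modify p.1 [] (fun l => l ++ [p.2])) PySem.Dict.empty).getD c []
      = pvRaw (pvL params_dict co) c := by
    intro c
    have h := PySem.Dict.getD_foldl_modify_append (pvL params_dict co) PySem.Dict.empty c
    rw [PySem.Dict.getD_empty] at h
    simpa [pvRaw] using h
  have hitems : ((pvL params_dict co).foldl
        (fun d p => d.modify p.1 [] (fun l => l ++ [p.2])) PySem.Dict.empty).items
      = (PySem.Set.ofList ((pvL params_dict co).map (fun p => p.1))).map
          (fun c => (c, pvRaw (pvL params_dict co) c)) := by
    rw [PySem.Dict.items_eq_map_keys _ hnd ([] : List String), hkeys]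
    exact List.map_congr_left (fun c _ => by rw [hget c])
  have hsorted : PySem.List.sorted ((pvL params_dict co).foldl
        (fun d p => d.modify p.1 [] (fun l => l ++ [p.2])) PySem.Dict.empty).items
        (fun p => p.1)
      = (pvC (pvL params_dict co)).map (fun c => (c, pvRaw (pvL params_dict co) c)) := by
    apply PySem.List.sorted_eq_of_perm_of_pairwise_lt
    · rw [hitems]
      exact (PySem.List.sorted_perm _ _ _).map _
    · rw [List.pairwise_map]
      exact PySem.List.sorted_ofList_pairwise_lt _
  rw [hsorted, pv_phase2_fold ms (pvL params_dict co) (pvC (pvL params_dict co)) []]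
  rw [List.nil_append]
  rfl

-- ===== link B to pvOut =====
theorem pv_B_eq_pvOut (params_dict : List (String × List (String × String)))
    (co ms : Bool) :
    format_choices_for_ui_alt params_dict co ms = pvOut ms (pvL params_dict co) := by
  have h0 : format_choices_for_ui_alt params_dict co ms =
      ((PySem.List.sorted2
          (params_dict.foldl (fun ps kd =>
            if pvSkip co kd.2 then ps else ps ++ [(pvCatOf kd.2, pvNameOf kd.2)]) [])
          (fun p => p.1) (fun p => p.2)).foldl (pvStep ms)
        (([] : List String), (none : Option String))).1 := rfl
  rw [h0, pv_pairs_eq, List.nil_append, pv_sorted2_eq_groups]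
  rw [pv_scan_flat ms (pvC (pvL params_dict co)) (pvNs (pvL params_dict co)) [] none
    (by unfold pvC; exact PySem.List.sorted_ofList_pairwise_lt _)
    (fun c hc => pv_ns_ne_nil _ c ((pv_mem_pvC _ c).mp hc))
    (fun c _ => by simp)]
  rw [List.nil_append]
  rfl

-- ===== VERDICT (by name: the statement is the Claim_ definition above) =====
theorem format_choices_for_ui_spec : Claim_equal_format_choices_for_ui := by
  intro params_dict co ms _ _
  unfold Spec_format_choices_for_ui
  rw [pv_A_eq_pvOut, pv_B_eq_pvOut]
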